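-- pv_equiv track=rewrite | github.com/Buddhilasiri/TextToSpeechApp | main.py | replace_punctuation
-- ===== SOURCE A (Python) =====
-- def replace_punctuation(text):
--     """Replace punctuation with words to make the TTS engine read them."""
--     replacements = {
--         ".": " full stop",
--         ",": " comma",
--         "!": " exclamation mark",
--         "?": " question mark",
--         ":": " colon",
--         ";": " semicolon",
--         "(": " open parenthesis",
--         ")": " close parenthesis",
--         "'": " apostrophe"
--     }
--
--     for punct, word in replacements.items():
--         text = text.replace(punct, word)
--
--     return text
-- ===== SOURCE B (Python) =====
-- def spoken(c):
--     """Spoken word for a punctuation character, or the character itself."""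
--     if c == '.':
--         return ' full stop'
--     elif c == ',':
--         return ' comma'
--     elif c == '!':
--         return ' exclamation mark'
--     elif c == '?':
--         return ' question mark'
--     elif c == ':':
--         return ' colon'
--     elif c == ';':
--         return ' semicolon'
--     elif c == '(':
--         return ' open parenthesis'
--     elif c == ')':
--         return ' close parenthesis'
--     elif c == "'":
--         return ' apostrophe'
--     else:
--         return c
--
-- def replace_punctuation(text):
--     """Replace punctuation with words to make the TTS engine read them."""
--     parts = []
--     for c in text:
--         parts.append(spoken(c))
--     return ''.join(parts)
-- ===== Notes on version B (the rewrite author's own statement) =====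
-- stated objective: simpler
-- what changed: B drops the replacements dict and the nine sequential whole-string str.replace passes: a helper maps each character to its spoken word via an if/elif chain, and one loop over the characters joins the pieces; equivalent because every pattern is a single character and no replacement word contains a pattern.
import Mathlib
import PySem

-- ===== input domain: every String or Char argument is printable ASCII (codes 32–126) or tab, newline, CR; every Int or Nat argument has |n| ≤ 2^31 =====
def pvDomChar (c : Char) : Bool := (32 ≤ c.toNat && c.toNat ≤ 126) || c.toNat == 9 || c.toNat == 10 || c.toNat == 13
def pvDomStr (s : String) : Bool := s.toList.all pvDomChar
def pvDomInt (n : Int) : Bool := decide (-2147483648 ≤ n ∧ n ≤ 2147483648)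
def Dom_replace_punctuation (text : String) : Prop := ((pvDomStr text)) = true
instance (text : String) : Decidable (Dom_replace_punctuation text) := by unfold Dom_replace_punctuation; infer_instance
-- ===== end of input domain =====

-- B drops the dict and the nine sequential whole-string str.replace passes: a per-character
-- if-chain helper plus one joining loop over the characters (simpler decomposition).


-- ===== PORT A =====
def replace_punctuation (text : String) : String :=
  let replacements : PySem.Dict String String := PySem.Dict.mk
    [(".", " full stop"), (",", " comma"), ("!", " exclamation mark"), ("?", " question mark"),
     (":", " colon"), (";", " semicolon"), ("(", " open parenthesis"), (")", " close parenthesis"),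
     ("'", " apostrophe")]
  replacements.items.foldl (fun t pw => PySem.Str.replace t pw.1 pw.2) text

-- ===== PORT B =====
def spokenB (c : Char) : String :=
  if c = '.' then " full stop"
  else if c = ',' then " comma"
  else if c = '!' then " exclamation mark"
  else if c = '?' then " question mark"
  else if c = ':' then " colon"
  else if c = ';' then " semicolon"
  else if c = '(' then " open parenthesis"
  else if c = ')' then " close parenthesis"
  else if c = '\'' then " apostrophe"
  else String.ofList [c]

def replace_punctuation_alt (text : String) : String :=
  let parts : List String := text.toList.foldl (fun acc c => acc ++ [spokenB c]) []
  PySem.Str.join "" parts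

-- ===== PRECONDITION & SPEC =====
def Spec_replace_punctuation (text : String) (out : String) : Prop := out = replace_punctuation_alt text
instance (text : String) (out : String) : Decidable (Spec_replace_punctuation text out) := by unfold Spec_replace_punctuation; infer_instance

-- ===== CLAIM (what is proved, stated in full; the proofs are below) =====
def Claim_equal_replace_punctuation : Prop := ∀ (text : String), Dom_replace_punctuation text → Spec_replace_punctuation text (replace_punctuation text)

-- ===== LEMMAS AND PROOFS =====

-- Chars.replace.go with a single-character pattern acts independently on each character.
lemma pvGoSingle (c : Char) (w : List Char) :
    ∀ (l : List Char) (fuel : Nat) (acc : List Char), l.length ≤ fuel →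
      PySem.Chars.replace.go [c] w fuel l acc
        = acc.reverse ++ l.flatMap (fun x => if x = c then w else [x]) := by
  intro l
  induction l with
  | nil => intro fuel acc _; cases fuel <;> simp [PySem.Chars.replace.go]
  | cons x t ih =>
    intro fuel acc h
    cases fuel with
    | zero => simp at h
    | succ n =>
      simp only [PySem.Chars.replace.go]
      by_cases hx : x = c
      · subst hx
        have hp : List.isPrefixOf [x] (x :: t) = true := by simp [List.isPrefixOf]
        simp [hp, ih n (w.reverse ++ acc) (by simpa using h)]
      · have hp : List.isPrefixOf [c] (x :: t) = false := by
          simp [List.isPrefixOf]; exact fun he => (hx he.symm).elim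
        simp [hp, ih n (x :: acc) (by simpa using h), hx]

-- str.replace with a single-character pattern is a per-character flatMap.
lemma pvReplaceSingle (c : Char) (w l : List Char) :
    PySem.Chars.replace l [c] w = l.flatMap (fun x => if x = c then w else [x]) := by
  simp [PySem.Chars.replace, pvGoSingle c w l l.length [] (le_refl _)]

-- ''.join is concatenation.
lemma pvJoinNilSep (parts : List (List Char)) :
    PySem.Chars.join [] parts = parts.flatten := by
  induction parts with
  | nil => simp [PySem.Chars.join_nil]
  | cons p rest ih =>
    cases rest with
    | nil => simp [PySem.Chars.join, List.intercalate]
    | cons q r => simp [PySem.Chars.join_cons_cons, ih]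

-- the appending fold builds the map of spokenB over the characters
lemma pvFoldAppend (l : List Char) (acc : List String) :
    l.foldl (fun acc c => acc ++ [spokenB c]) acc = acc ++ l.map spokenB := by
  induction l generalizing acc with
  | nil => simp
  | cons x t ih => simp [List.foldl, ih]

-- ===== VERDICT (by name: the statement is the Claim_ definition above) =====
theorem replace_punctuation_spec : Claim_equal_replace_punctuation := by
  unfold Claim_equal_replace_punctuation Spec_replace_punctuation
  intro text _
  have h : (replace_punctuation text).toList = (replace_punctuation_alt text).toList := by
    simp only [replace_punctuation, replace_punctuation_alt, List.foldl,
      PySem.Str.toList_replace, PySem.Str.toList_join, pvFoldAppend, List.nil_append]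
    simp only [show (".":String).toList = ['.'] from rfl, show (",":String).toList = [','] from rfl,
      show ("!":String).toList = ['!'] from rfl, show ("?":String).toList = ['?'] from rfl,
      show (":":String).toList = [':'] from rfl, show (";":String).toList = [';'] from rfl,
      show ("(":String).toList = ['('] from rfl, show (")":String).toList = [')'] from rfl,
      show ("'":String).toList = ['\''] from rfl, show ("":String).toList = ([]:List Char) from rfl,
      pvReplaceSingle, List.flatMap_assoc, pvJoinNilSep, List.map_map]
    rw [← List.flatMap_def]
    congr 1
    funext x
    by_cases h1 : x = '.'
    · subst h1; decide
    by_cases h2 : x = ','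
    · subst h2; decide
    by_cases h3 : x = '!'
    · subst h3; decide
    by_cases h4 : x = '?'
    · subst h4; decide
    by_cases h5 : x = ':'
    · subst h5; decide
    by_cases h6 : x = ';'
    · subst h6; decide
    by_cases h7 : x = '('
    · subst h7; decide
    by_cases h8 : x = ')'
    · subst h8; decide
    by_cases h9 : x = '\''
    · subst h9; decide
    simp [h1, h2, h3, h4, h5, h6, h7, h8, h9, spokenB]
  exact String.toList_inj.mp h
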